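-- pv_equiv track=rewrite | github.com/downgutzdev/Agents-Backend-MIRAI | app/utils/session_batch.py | _dedup_join
-- ===== SOURCE A (Python) =====
-- from typing import List, Dict
--
-- def _dedup_join(items: List[str], max_len: int) -> str:
--     """
--     Join unique non-empty strings with '; ' without exceeding max_len.
--     """
--     seen = set()
--     out = []
--     total = 0
--     for it in items:
--         it = (it or "").strip()
--         if not it:
--             continue
--         key = it.lower()
--         if key in seen:
--             continue
--         seen.add(key)
--         add_len = len(it) + (2 if out else 0)  # accounts for "; "
--         if total + add_len > max_len:
--             break
--         out.append(it)
--         total += add_len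
--     return "; ".join(out)
-- ===== SOURCE B (Python) =====
-- from typing import List
--
-- def _dedup_join(items: List[str], max_len: int) -> str:
--     """Join unique non-empty strings with '; ' without exceeding max_len."""
--     seen = set()
--     uniq = []
--     for it in items:
--         it = (it or "").strip()
--         if not it:
--             continue
--         k = it.lower()
--         if k not in seen:
--             seen.add(k)
--             uniq.append(it)
--     out = []
--     for it in uniq:
--         if len("; ".join(out + [it])) > max_len:
--             break
--         out.append(it)
--     return "; ".join(out)
-- ===== Notes on version B (the rewrite author's own statement) =====
-- stated objective: simpler
-- what changed: Split A's single loop with a running 'total' counter and manual '+2' separator arithmetic into a dedup pass followed by a greedy pass that computes the prospective joined length directly with len('; '.join(out + [it])).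
import Mathlib
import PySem

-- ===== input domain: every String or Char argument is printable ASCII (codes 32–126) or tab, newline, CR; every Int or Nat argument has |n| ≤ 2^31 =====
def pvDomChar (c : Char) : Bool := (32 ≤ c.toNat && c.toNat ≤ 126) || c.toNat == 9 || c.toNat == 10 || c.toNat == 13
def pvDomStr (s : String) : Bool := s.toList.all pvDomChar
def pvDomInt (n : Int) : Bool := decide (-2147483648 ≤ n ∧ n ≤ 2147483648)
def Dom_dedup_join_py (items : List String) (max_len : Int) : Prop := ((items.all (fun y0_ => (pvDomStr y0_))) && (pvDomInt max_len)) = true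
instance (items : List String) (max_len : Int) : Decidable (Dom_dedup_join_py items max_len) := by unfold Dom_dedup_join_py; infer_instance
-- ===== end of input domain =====

-- B replaces A's running 'total' accumulator and manual '+2' separator arithmetic by a
-- dedup pass followed by a greedy pass that recomputes the joined length directly (objective: simpler).

-- ===== PORT A =====
-- one loop: strip, skip empties, dedup by lowercase key, break on first overflow of the running total
def pvALoop (max_len : Int) : List String → PySem.Set String → List String → Int → List String
  | [], _, out, _ => out
  | it :: rest, seen, out, total =>
    let it' := PySem.Str.strip it
    if it' = "" then pvALoop max_len rest seen out total
    else
      let key := PySem.Str.lower it'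
      if key ∈ seen then pvALoop max_len rest seen out total
      else
        let add_len : Int := PySem.Str.len it' + (if out ≠ [] then 2 else 0)
        if total + add_len > max_len then out
        else pvALoop max_len rest (seen.add key) (out ++ [it']) (total + add_len)

def dedup_join_py (items : List String) (max_len : Int) : String :=
  PySem.Str.join "; " (pvALoop max_len items PySem.Set.empty [] 0)

-- ===== PORT B =====
-- pass 1: normalized, deduplicated (case-insensitively) non-empty strings, order kept
def pvBUniq : List String → PySem.Set String → List String
  | [], _ => []
  | it :: rest, seen =>
    let s := PySem.Str.strip it
    if s = "" then pvBUniq rest seen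
    else
      let k := PySem.Str.lower s
      if k ∈ seen then pvBUniq rest seen
      else s :: pvBUniq rest (seen.add k)

-- pass 2: greedily extend 'out' while the joined length stays within max_len
def pvBGreedy (max_len : Int) : List String → List String → List String
  | [], out => out
  | it :: rest, out =>
    if PySem.Str.len (PySem.Str.join "; " (out ++ [it])) > max_len then out
    else pvBGreedy max_len rest (out ++ [it])

def dedup_join_py_alt (items : List String) (max_len : Int) : String :=
  PySem.Str.join "; " (pvBGreedy max_len (pvBUniq items PySem.Set.empty) [])

-- ===== PRECONDITION & SPEC =====
def Spec_dedup_join_py (items : List String) (max_len : Int) (out : String) : Prop := out = dedup_join_py_alt items max_len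
instance (items : List String) (max_len : Int) (out : String) : Decidable (Spec_dedup_join_py items max_len out) := by unfold Spec_dedup_join_py; infer_instance

-- ===== CLAIM (what is proved, stated in full; the proofs are below) =====
def Claim_equal_dedup_join_py : Prop := ∀ (items : List String) (max_len : Int), Dom_dedup_join_py items max_len → Spec_dedup_join_py items max_len (dedup_join_py items max_len)

-- ===== LEMMAS AND PROOFS =====

-- length of a join after appending one more part (chars level)
theorem pv_join_len_append (sep : List Char) (ps : List (List Char)) (p : List Char) :
    (PySem.Chars.join sep (ps ++ [p])).length =
      if ps = [] then p.length else (PySem.Chars.join sep ps).length + sep.length + p.length := by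
  induction ps with
  | nil => simp [PySem.Chars.join_singleton]
  | cons q qs ih =>
    cases qs with
    | nil =>
      simp [PySem.Chars.join_singleton, PySem.Chars.join_cons_cons]
      omega
    | cons r rs =>
      have ih' := ih
      rw [if_neg (by simp)] at ih'
      simp only [List.cons_append] at ih'
      rw [List.cons_append, List.cons_append, PySem.Chars.join_cons_cons, PySem.Chars.join_cons_cons, if_neg (by simp)]
      simp [List.length_append, ih']
      omega

-- string-level form, with sep = "; "
theorem pv_strlen_join_append (out : List String) (x : String) :
    PySem.Str.len (PySem.Str.join "; " (out ++ [x])) =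
      PySem.Str.len (PySem.Str.join "; " out) + PySem.Str.len x + (if out ≠ [] then 2 else 0) := by
  rw [PySem.Str.len_eq, PySem.Str.len_eq, PySem.Str.len_eq,
      PySem.Str.toList_join, PySem.Str.toList_join]
  simp only [List.map_append, List.map_cons, List.map_nil]
  rw [pv_join_len_append]
  by_cases h : out = []
  · subst h; simp [PySem.Chars.join_nil]
  · have hm : List.map String.toList out ≠ [] := by simpa using h
    rw [if_neg hm, if_pos h]
    push_cast
    simp [String.toList]
    ring

-- main invariant: A's loop with total = len(join out) equals B's greedy pass on B's uniq list
theorem pv_loop_eq (max_len : Int) (rest : List String) :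
    ∀ (seen : PySem.Set String) (out : List String) (total : Int),
      total = PySem.Str.len (PySem.Str.join "; " out) →
      pvALoop max_len rest seen out total = pvBGreedy max_len (pvBUniq rest seen) out := by
  induction rest with
  | nil => intro seen out total h; simp [pvALoop, pvBUniq, pvBGreedy]
  | cons it rest ih =>
    intro seen out total h
    simp only [pvALoop, pvBUniq]
    by_cases he : PySem.Str.strip it = ""
    · simp only [he, if_true]
      exact ih seen out total h
    · simp only [if_neg he]
      by_cases hk : PySem.Str.lower (PySem.Str.strip it) ∈ seen
      · simp only [if_pos hk]
        exact ih seen out total h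
      · simp only [if_neg hk]
        simp only [pvBGreedy]
        rw [pv_strlen_join_append]
        have hcond : total + (PySem.Str.len (PySem.Str.strip it) + (if out ≠ [] then 2 else 0)) > max_len ↔
            PySem.Str.len (PySem.Str.join "; " out) + PySem.Str.len (PySem.Str.strip it) + (if out ≠ [] then 2 else 0) > max_len := by
          rw [h]; constructor <;> intro <;> omega
        by_cases hb : total + (PySem.Str.len (PySem.Str.strip it) + (if out ≠ [] then 2 else 0)) > max_len
        · rw [if_pos hb, if_pos (hcond.mp hb)]
        · rw [if_neg hb, if_neg (fun hx => hb (hcond.mpr hx))]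
          apply ih
          rw [pv_strlen_join_append, h]
          ring

-- ===== VERDICT (by name: the statement is the Claim_ definition above) =====
theorem dedup_join_py_spec : Claim_equal_dedup_join_py := by
  intro items max_len _
  unfold Spec_dedup_join_py dedup_join_py dedup_join_py_alt
  rw [pv_loop_eq]
  rfl
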